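-- pv_equiv track=rewrite | github.com/Sovun/CCStatistics | src/output_writer.py | _contiguous_groups
-- ===== SOURCE A (Python) =====
-- def _contiguous_groups(indices: list) -> list:
--     """Convert a list of row indices into (start, end) range tuples."""
--     if not indices:
--         return []
--     groups, start, prev = [], indices[0], indices[0]
--     for r in indices[1:]:
--         if r == prev + 1:
--             prev = r
--         else:
--             groups.append((start, prev + 1))
--             start = prev = r
--     groups.append((start, prev + 1))
--     return groups
-- ===== SOURCE B (Python) =====
-- def _contiguous_groups(indices: list) -> list:
--     """Convert a list of row indices into (start, end) range tuples.
--
--     Staged-passes formulation: first collect the break pairs (a, b) where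
--     a is the last element of one run and b the first of the next, then
--     assemble the starts list and the ends list separately and zip them."""
--     if not indices:
--         return []
--     brk = [(a, b) for a, b in zip(indices, indices[1:]) if b != a + 1]
--     starts = [indices[0]] + [b for a, b in brk]
--     ends = [a + 1 for a, b in brk] + [indices[-1] + 1]
--     return list(zip(starts, ends))
-- ===== Notes on version B (the rewrite author's own statement) =====
-- stated objective: alternative
-- what changed: Replaces the single accumulator loop with running start/prev state by staged passes: collect the break pairs from zipping the list with its tail, build the starts list and the ends list separately, and zip them into ranges.
import Mathlib
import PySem

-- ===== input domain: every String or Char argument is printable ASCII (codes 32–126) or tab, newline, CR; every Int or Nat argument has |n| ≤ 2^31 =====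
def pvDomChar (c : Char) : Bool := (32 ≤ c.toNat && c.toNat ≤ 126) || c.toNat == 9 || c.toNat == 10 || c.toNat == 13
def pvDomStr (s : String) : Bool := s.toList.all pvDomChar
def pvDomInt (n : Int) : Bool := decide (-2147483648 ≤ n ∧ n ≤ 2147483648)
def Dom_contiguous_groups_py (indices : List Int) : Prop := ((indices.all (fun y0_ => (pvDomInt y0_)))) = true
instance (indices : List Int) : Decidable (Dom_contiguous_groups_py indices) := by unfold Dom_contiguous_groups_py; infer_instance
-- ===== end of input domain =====

-- B replaces A's running-state loop by staged passes (break pairs, then starts/ends lists, then zip); no speed claim.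

-- ===== PORT A =====
-- literal port of A's left-to-right loop with state (groups, start, prev)
def contiguous_groups_py (indices : List Int) : List (Int × Int) :=
  match indices with
  | [] => []
  | i0 :: rest =>
    let st := rest.foldl (fun (acc : List (Int × Int) × Int × Int) r =>
      if r = acc.2.2 + 1 then (acc.1, acc.2.1, r)
      else (acc.1 ++ [(acc.2.1, acc.2.2 + 1)], r, r)) ([], i0, i0)
    st.1 ++ [(st.2.1, st.2.2 + 1)]

-- ===== PORT B =====
-- Source B: break pairs from zip(indices, indices[1:]), then starts and ends built
-- separately and zipped; indices[-1] on the non-empty list is List.getLast.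
def contiguous_groups_py_alt (indices : List Int) : List (Int × Int) :=
  match indices with
  | [] => []
  | i0 :: rest =>
    let brk := ((i0 :: rest).zip rest).filter (fun p => p.2 ≠ p.1 + 1)
    let starts := i0 :: brk.map (fun p => p.2)
    let ends := brk.map (fun p => p.1 + 1) ++ [(i0 :: rest).getLast (by simp) + 1]
    starts.zip ends

-- ===== PRECONDITION & SPEC =====
def Spec_contiguous_groups_py (indices : List Int) (out : List (Int × Int)) : Prop := out = contiguous_groups_py_alt indices
instance (indices : List Int) (out : List (Int × Int)) : Decidable (Spec_contiguous_groups_py indices out) := by unfold Spec_contiguous_groups_py; infer_instance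

-- ===== CLAIM (what is proved, stated in full; the proofs are below) =====
def Claim_equal_contiguous_groups_py : Prop := ∀ (indices : List Int), Dom_contiguous_groups_py indices → Spec_contiguous_groups_py indices (contiguous_groups_py indices)

-- ===== LEMMAS AND PROOFS =====

-- proof-only characterisation of A's remaining output from state (start, prev)
def cgStep (start prev : Int) : List Int → List (Int × Int)
  | [] => [(start, prev + 1)]
  | r :: rs => if r = prev + 1 then cgStep start r rs else (start, prev + 1) :: cgStep r r rs

theorem contiguous_groups_py_foldl (rest : List Int) :
    ∀ (groups : List (Int × Int)) (start prev : Int),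
    (let st := rest.foldl (fun (acc : List (Int × Int) × Int × Int) r =>
      if r = acc.2.2 + 1 then (acc.1, acc.2.1, r)
      else (acc.1 ++ [(acc.2.1, acc.2.2 + 1)], r, r)) (groups, start, prev)
     st.1 ++ [(st.2.1, st.2.2 + 1)]) = groups ++ cgStep start prev rest := by
  induction rest with
  | nil => intro groups start prev; simp [cgStep]
  | cons r rs ih =>
    intro groups start prev
    by_cases h : r = prev + 1
    · simp [List.foldl, cgStep, h, ih]
    · simp [List.foldl, cgStep, h, ih]

-- B's staged construction, as a function of the leading run state (start, prev, rest)
theorem alt_eq_cgStep (rs : List Int) : ∀ (prev start : Int) (hne : prev :: rs ≠ []),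
    ((start :: (((prev :: rs).zip rs).filter (fun p => p.2 ≠ p.1 + 1)).map (fun p => p.2)).zip
      ((((prev :: rs).zip rs).filter (fun p => p.2 ≠ p.1 + 1)).map (fun p => p.1 + 1) ++
        [(prev :: rs).getLast hne + 1])) = cgStep start prev rs := by
  induction rs with
  | nil => intro prev start hne; simp [cgStep]
  | cons r rs' ih =>
    intro prev start hne
    by_cases h : r = prev + 1
    · subst h
      have hr := ih (prev + 1) start (by simp)
      simp only [List.zip_cons_cons, List.filter_cons, ne_eq, decide_not, cgStep,
        List.getLast_cons (l := (prev + 1) :: rs') (by simp)] at hr ⊢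
      simpa using hr
    · have hr := ih r r (by simp)
      simp only [List.zip_cons_cons, List.filter_cons, ne_eq, decide_not, List.getLast_cons (l := r :: rs') (by simp)] at hr ⊢
      simp only [h, decide_false, Bool.not_false, cgStep]
      simpa using hr

-- ===== VERDICT (by name: the statement is the Claim_ definition above) =====
theorem contiguous_groups_py_spec : Claim_equal_contiguous_groups_py := by
  intro indices _
  unfold Spec_contiguous_groups_py contiguous_groups_py contiguous_groups_py_alt
  match indices with
  | [] => rfl
  | i0 :: rest =>
    have hA := contiguous_groups_py_foldl rest [] i0 i0
    simp only [List.nil_append] at hA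
    simpa [hA] using (alt_eq_cgStep rest i0 i0 (by simp)).symm
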